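-- pv_equiv track=rewrite | github.com/JENGADJY/stage_Imperator | pdf_.py | identifier_lignes_non_appariees
-- ===== SOURCE A (Python) =====
-- def identifier_lignes_non_appariees(recto_lines, verso_lines):
--     min_length = min(len(recto_lines), len(verso_lines))
--     lignes_non_appariees = []
--     for i in range(min_length):
--         if recto_lines[i] != verso_lines[i]:
--             lignes_non_appariees.append((i + 1, recto_lines[i], verso_lines[i]))
--     if len(recto_lines) > min_length:
--         for i in range(min_length, len(recto_lines)):
--             lignes_non_appariees.append((i + 1, recto_lines[i], "---"))
--     if len(verso_lines) > min_length:
--         for i in range(min_length, len(verso_lines)):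
--             lignes_non_appariees.append((i + 1, "---", verso_lines[i]))
--     return lignes_non_appariees
-- ===== SOURCE B (Python) =====
-- def identifier_lignes_non_appariees(recto_lines, verso_lines):
--     # Divide-and-conquer: split the aligned index range in half, solve each
--     # half on the corresponding slices, and concatenate the results in order.
--     def solve(r, v, base):
--         n = max(len(r), len(v))
--         if n == 0:
--             return []
--         if n == 1:
--             a = r[0] if r else None
--             b = v[0] if v else None
--             if a is None:
--                 return [(base + 1, "---", b)]
--             if b is None:
--                 return [(base + 1, a, "---")]
--             return [(base + 1, a, b)] if a != b else []
--         k = n // 2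
--         return solve(r[:k], v[:k], base) + solve(r[k:], v[k:], base + k)
--     return solve(recto_lines, verso_lines, 0)
-- ===== Notes on version B (the rewrite author's own statement) =====
-- stated objective: alternative
-- what changed: Replaces A's min-length computation plus three sequential index loops by a divide-and-conquer recursion that halves the aligned index range, solves each half on list slices, and concatenates; correct because the mismatch list of an aligned pair splits at any cut point into the mismatch lists of the two slice pairs with shifted line numbers.
import Mathlib
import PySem

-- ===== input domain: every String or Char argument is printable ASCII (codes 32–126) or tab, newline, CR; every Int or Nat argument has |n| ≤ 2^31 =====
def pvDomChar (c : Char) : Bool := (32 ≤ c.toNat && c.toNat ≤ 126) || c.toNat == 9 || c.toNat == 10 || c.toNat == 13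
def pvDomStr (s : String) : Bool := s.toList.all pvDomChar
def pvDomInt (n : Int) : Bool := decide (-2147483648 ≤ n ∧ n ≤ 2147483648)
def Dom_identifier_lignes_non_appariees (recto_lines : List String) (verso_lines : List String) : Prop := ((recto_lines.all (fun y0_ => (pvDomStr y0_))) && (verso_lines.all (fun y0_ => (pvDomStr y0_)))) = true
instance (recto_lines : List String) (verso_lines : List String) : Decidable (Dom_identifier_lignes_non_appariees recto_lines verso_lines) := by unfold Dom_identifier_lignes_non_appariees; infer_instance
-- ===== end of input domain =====

-- B replaces A's min-length computation plus three sequential index loops by a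
-- divide-and-conquer recursion halving the aligned index range (objective: alternative).

-- ===== PORT A =====
def identifier_lignes_non_appariees (recto_lines : List String) (verso_lines : List String) : List (Int × String × String) :=
  let min_length : Int := min (recto_lines.length : Int) (verso_lines.length : Int)
  let lignes : List (Int × String × String) := []
  let lignes := (PySem.List.pyRange 0 min_length 1).foldl (fun acc i =>
    if PySem.List.pyGetD recto_lines i "" ≠ PySem.List.pyGetD verso_lines i "" then
      acc ++ [(i + 1, PySem.List.pyGetD recto_lines i "", PySem.List.pyGetD verso_lines i "")]
    else acc) lignes
  let lignes := if (recto_lines.length : Int) > min_length then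
      (PySem.List.pyRange min_length (recto_lines.length : Int) 1).foldl (fun acc i =>
        acc ++ [(i + 1, PySem.List.pyGetD recto_lines i "", "---")]) lignes
    else lignes
  let lignes := if (verso_lines.length : Int) > min_length then
      (PySem.List.pyRange min_length (verso_lines.length : Int) 1).foldl (fun acc i =>
        acc ++ [(i + 1, "---", PySem.List.pyGetD verso_lines i "")]) lignes
    else lignes
  lignes

-- ===== PORT B =====
-- helper `solve(r, v, base)` from Source B (recursion on halved slices)
def pvSolve (r : List String) (v : List String) (base : Int) : List (Int × String × String) :=
  if _h0 : max r.length v.length = 0 then []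
  else if _h1 : max r.length v.length = 1 then
    -- a = r[0] if r else None ; b = v[0] if v else None
    match r.head?, v.head? with
    | none, none => []
    | none, some b => [(base + 1, "---", b)]
    | some a, none => [(base + 1, a, "---")]
    | some a, some b => if a ≠ b then [(base + 1, a, b)] else []
  else
    pvSolve (r.take (max r.length v.length / 2)) (v.take (max r.length v.length / 2)) base ++
    pvSolve (r.drop (max r.length v.length / 2)) (v.drop (max r.length v.length / 2))
      (base + ((max r.length v.length / 2 : Nat) : Int))
termination_by r.length + v.length
decreasing_by
  · simp only [List.length_take]; omega
  · simp only [List.length_drop]; omega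

def identifier_lignes_non_appariees_alt (recto_lines : List String) (verso_lines : List String) : List (Int × String × String) :=
  pvSolve recto_lines verso_lines 0

-- ===== PRECONDITION & SPEC =====
def Spec_identifier_lignes_non_appariees (recto_lines : List String) (verso_lines : List String) (out : List (Int × String × String)) : Prop := out = identifier_lignes_non_appariees_alt recto_lines verso_lines
instance (recto_lines : List String) (verso_lines : List String) (out : List (Int × String × String)) : Decidable (Spec_identifier_lignes_non_appariees recto_lines verso_lines out) := by unfold Spec_identifier_lignes_non_appariees; infer_instance

-- ===== CLAIM (what is proved, stated in full; the proofs are below) =====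
def Claim_equal_identifier_lignes_non_appariees : Prop := ∀ (recto_lines : List String) (verso_lines : List String), Dom_identifier_lignes_non_appariees recto_lines verso_lines → Spec_identifier_lignes_non_appariees recto_lines verso_lines (identifier_lignes_non_appariees recto_lines verso_lines)

-- ===== LEMMAS AND PROOFS =====

-- reference structural recursion: mismatches of the aligned pair, numbering from `base`
def pvSpec : List String → List String → Int → List (Int × String × String)
  | [], [], _ => []
  | [], b :: bs, i => (i + 1, "---", b) :: pvSpec [] bs (i + 1)
  | a :: as, [], i => (i + 1, a, "---") :: pvSpec as [] (i + 1)
  | a :: as, b :: bs, i => (if a ≠ b then [(i + 1, a, b)] else []) ++ pvSpec as bs (i + 1)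

theorem pvSpec_split (k : Nat) : ∀ (r v : List String) (base : Int),
    pvSpec r v base
      = pvSpec (r.take k) (v.take k) base ++ pvSpec (r.drop k) (v.drop k) (base + (k : Int)) := by
  induction k with
  | zero => intro r v base; simp [pvSpec]
  | succ k ih =>
    intro r v base
    have hb : base + ((k + 1 : Nat) : Int) = (base + 1) + (k : Int) := by push_cast; ring
    match r, v with
    | [], [] => simp [pvSpec]
    | [], b :: bs =>
      simp only [List.take_nil, List.drop_nil, List.take_succ_cons, List.drop_succ_cons, pvSpec,
        List.cons_append, hb]
      rw [ih [] bs (base + 1)]; simp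
    | a :: as, [] =>
      simp only [List.take_nil, List.drop_nil, List.take_succ_cons, List.drop_succ_cons, pvSpec,
        List.cons_append, hb]
      rw [ih as [] (base + 1)]; simp
    | a :: as, b :: bs =>
      simp only [List.take_succ_cons, List.drop_succ_cons, pvSpec, List.append_assoc, hb]
      rw [ih as bs (base + 1)]

theorem pvSolve_eq_spec (N : Nat) : ∀ (r v : List String), r.length + v.length ≤ N →
    ∀ (base : Int), pvSolve r v base = pvSpec r v base := by
  induction N with
  | zero =>
    intro r v h base
    cases r with
    | cons a as => simp at h
    | nil =>
      cases v with
      | cons b bs => simp at h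
      | nil => rw [pvSolve]; simp [pvSpec]
  | succ N ih =>
    intro r v h base
    rw [pvSolve]
    split
    · rename_i h0
      cases r with
      | cons a as => simp at h0
      | nil =>
        cases v with
        | cons b bs => simp at h0
        | nil => simp [pvSpec]
    · rename_i h0
      split
      · rename_i h1
        cases r with
        | nil =>
          cases v with
          | nil => simp at h0
          | cons b bs =>
            have hbs : bs = [] := by
              simp only [List.length_nil, List.length_cons] at h1
              exact List.eq_nil_of_length_eq_zero (by omega)
            subst hbs
            simp [pvSpec]
        | cons a as =>
          cases v with
          | nil =>
            have has : as = [] := by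
              simp only [List.length_nil, List.length_cons] at h1
              exact List.eq_nil_of_length_eq_zero (by omega)
            subst has
            simp [pvSpec]
          | cons b bs =>
            have has : as = [] := by
              simp only [List.length_cons] at h1
              exact List.eq_nil_of_length_eq_zero (by omega)
            have hbs : bs = [] := by
              simp only [List.length_cons] at h1
              exact List.eq_nil_of_length_eq_zero (by omega)
            subst has; subst hbs
            by_cases hab : a = b <;> simp [pvSpec, hab]
      · rename_i h1
        have hA : (r.take (max r.length v.length / 2)).length
            + (v.take (max r.length v.length / 2)).length ≤ N := by
          simp only [List.length_take]; omega
        have hB : (r.drop (max r.length v.length / 2)).length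
            + (v.drop (max r.length v.length / 2)).length ≤ N := by
          simp only [List.length_drop]; omega
        rw [ih _ _ hA base, ih _ _ hB _]
        exact (pvSpec_split (max r.length v.length / 2) r v base).symm

theorem pvSpec_nil_left (v : List String) : ∀ (base : Int),
    pvSpec [] v base = (PySem.List.enumerate v base).map (fun p => (p.1 + 1, "---", p.2)) := by
  induction v with
  | nil => intro base; simp [pvSpec]
  | cons b bs ih => intro base; simp [pvSpec, PySem.List.enumerate_cons, ih]

theorem pvSpec_nil_right (r : List String) : ∀ (base : Int),
    pvSpec r [] base = (PySem.List.enumerate r base).map (fun p => (p.1 + 1, p.2, "---")) := by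
  induction r with
  | nil => intro base; simp [pvSpec]
  | cons a as ih => intro base; simp [pvSpec, PySem.List.enumerate_cons, ih]

theorem pvSpec_pieces : ∀ (r v : List String) (base : Int),
    pvSpec r v base =
      ((PySem.List.enumerate (List.zip r v) base).filter
          (fun p => decide (p.2.1 ≠ p.2.2))).map (fun p => (p.1 + 1, p.2.1, p.2.2))
      ++ ((PySem.List.enumerate (r.drop (List.zip r v).length)
            (base + ((List.zip r v).length : Int))).map (fun p => (p.1 + 1, p.2, "---"))
      ++ (PySem.List.enumerate (v.drop (List.zip r v).length)
            (base + ((List.zip r v).length : Int))).map (fun p => (p.1 + 1, "---", p.2))) := by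
  intro r
  induction r with
  | nil => intro v base; simp [pvSpec_nil_left]
  | cons a as ih =>
    intro v base
    cases v with
    | nil => simp [pvSpec_nil_right]
    | cons b bs =>
      have hc : base + (((List.zip as bs).length + 1 : Nat) : Int)
          = (base + 1) + ((List.zip as bs).length : Int) := by push_cast; ring
      simp only [List.zip_cons_cons, List.length_cons, PySem.List.enumerate_cons,
        List.drop_succ_cons, pvSpec, List.filter_cons, hc]
      rw [ih bs (base + 1)]
      by_cases hab : a = b
      · simp [hab]
      · simp [hab]

theorem pvRange_enum_drop (l : List String) (k : Nat) (h : k ≤ l.length) :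
    PySem.List.pyRange (k : Int) (l.length : Int) 1
      = (PySem.List.enumerate (l.drop k) (k : Int)).map (fun p => p.1) := by
  rw [PySem.List.map_fst_enumerate]
  congr 1
  push_cast [List.length_drop]
  omega

theorem pvA_eq_spec (r v : List String) :
    identifier_lignes_non_appariees r v = pvSpec r v 0 := by
  unfold identifier_lignes_non_appariees
  dsimp only
  set R : Int := (r.length : Int) with hR
  set V : Int := (v.length : Int) with hV
  set z : Nat := (List.zip r v).length with hz
  have hzmin : z = min r.length v.length := by rw [hz, List.length_zip]
  have hm : min R V = (z : Int) := by rw [hR, hV, hzmin]; push_cast; omega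
  rw [hm]
  -- loop 1: mismatches on the common prefix
  rw [PySem.List.foldl_append_ite
        (fun i => PySem.List.pyGetD r i "" ≠ PySem.List.pyGetD v i "")
        (fun i => (i + 1, PySem.List.pyGetD r i "", PySem.List.pyGetD v i ""))]
  -- tail loops become unconditional appended maps (an empty range when the test is false)
  have htail : ∀ (L : List (Int × String × String)) (b : Int) (F : Int → Int × String × String),
      (if b > (z : Int) then
        (PySem.List.pyRange (z : Int) b 1).foldl (fun acc i => acc ++ [F i]) L
      else L) = L ++ (PySem.List.pyRange (z : Int) b 1).map F := by
    intro L b F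
    split
    · rw [PySem.List.foldl_append_singleton_eq_map]
    · rw [PySem.List.pyRange_one_eq_nil (by omega)]; simp
  rw [htail, htail, List.nil_append, List.append_assoc]
  rw [pvSpec_pieces r v 0]
  simp only [zero_add, ← hz]
  -- piece 1
  have hzr : z ≤ r.length := by omega
  have hzv : z ≤ v.length := by omega
  rw [show PySem.List.pyRange 0 (z : Int) 1 = (PySem.List.enumerate (List.zip r v) 0).map (fun p => p.1) by
        rw [PySem.List.map_fst_enumerate]; congr 1; omega]
  rw [List.filter_map, List.map_map]
  rw [hR, pvRange_enum_drop r z hzr]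
  rw [hV, pvRange_enum_drop v z hzv]
  rw [List.map_map, List.map_map]
  congr 1
  · -- common-prefix piece
    have hfc : List.filter ((fun i => decide (PySem.List.pyGetD r i "" ≠ PySem.List.pyGetD v i "")) ∘ (fun p => p.1))
          (PySem.List.enumerate (List.zip r v) 0)
        = List.filter (fun p => decide (p.2.1 ≠ p.2.2)) (PySem.List.enumerate (List.zip r v) 0) := by
      apply List.filter_congr
      intro p hp
      rcases (PySem.List.mem_enumerate_iff _ _ _).mp hp with ⟨k, hk, rfl⟩
      have hkr : k < r.length := by omega
      have hkv : k < v.length := by omega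
      simp only [Function.comp, zero_add, List.getElem_zip]
      rw [PySem.List.pyGetD_natCast, PySem.List.pyGetD_natCast,
          List.getD_eq_getElem r "" hkr, List.getD_eq_getElem v "" hkv]
    rw [hfc]
    apply List.map_congr_left
    intro p hp
    have hp' : p ∈ PySem.List.enumerate (List.zip r v) 0 := List.mem_of_mem_filter hp
    rcases (PySem.List.mem_enumerate_iff _ _ _).mp hp' with ⟨k, hk, rfl⟩
    have hkr : k < r.length := by omega
    have hkv : k < v.length := by omega
    simp only [Function.comp, zero_add, List.getElem_zip]
    rw [PySem.List.pyGetD_natCast, PySem.List.pyGetD_natCast,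
        List.getD_eq_getElem r "" hkr, List.getD_eq_getElem v "" hkv]
  congr 1
  · -- recto leftover piece
    apply List.map_congr_left
    intro p hp
    rcases (PySem.List.mem_enumerate_iff _ _ _).mp hp with ⟨k, hk, rfl⟩
    have hkk : z + k < r.length := by
      simp only [List.length_drop] at hk; omega
    simp only [Function.comp, List.getElem_drop]
    rw [show ((z : Int) + (k : Int)) = ((z + k : Nat) : Int) by push_cast; ring,
        PySem.List.pyGetD_natCast, List.getD_eq_getElem r "" hkk]
  · -- verso leftover piece
    apply List.map_congr_left
    intro p hp
    rcases (PySem.List.mem_enumerate_iff _ _ _).mp hp with ⟨k, hk, rfl⟩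
    have hkk : z + k < v.length := by
      simp only [List.length_drop] at hk; omega
    simp only [Function.comp, List.getElem_drop]
    rw [show ((z : Int) + (k : Int)) = ((z + k : Nat) : Int) by push_cast; ring,
        PySem.List.pyGetD_natCast, List.getD_eq_getElem v "" hkk]

-- ===== VERDICT (by name: the statement is the Claim_ definition above) =====
theorem identifier_lignes_non_appariees_spec : Claim_equal_identifier_lignes_non_appariees := by
  intro r v _
  show identifier_lignes_non_appariees r v = identifier_lignes_non_appariees_alt r v
  rw [pvA_eq_spec, identifier_lignes_non_appariees_alt,
      pvSolve_eq_spec (r.length + v.length) r v le_rfl]
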